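-- pv_equiv track=rewrite | github.com/gamcil/cblaster | cblaster/extract_clusters.py | collapse_nucleotide_sequence
-- ===== SOURCE A (Python) =====
-- NUCLEOTIDE_LINE_LENGTH = 60
--
-- def collapse_nucleotide_sequence(line):
--     """Format a nuccleotide sequence string to be in genbank form
--     e.g.
--          1 aatgggcaaa aagc... etc
--         61 aaggtacccg ttta... etc
--     Args:
--         line (string): nucleotide string to format
--     Returns:
--         the same string formatted to be in genbank form
--     """
--     collapesed_sequence = ""
--     line = line.replace("\n", "")
--     for i in range(0, len(line), NUCLEOTIDE_LINE_LENGTH):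
--
--         sequence_line = line[i:i + NUCLEOTIDE_LINE_LENGTH].lower()
--         # add a space every 10 characters to resemble the NCBI genbank format
--         spaced_sequence_line = ' '.join(sequence_line[i:i + 10] for i in range(0, len(sequence_line), 10))
--         collapesed_sequence += f"{i + 1:>10} {spaced_sequence_line}\n"
--     return collapesed_sequence
-- ===== SOURCE B (Python) =====
-- def collapse_nucleotide_sequence(line):
--     """Single streaming pass over the characters of the cleaned sequence: a
--     position counter decides, per character, whether to emit the numbered line
--     header, a chunk separator space, or nothing before it; no slicing at all."""
--     seq = line.replace("\n", "").lower()
--     out = []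
--     for pos, ch in enumerate(seq):
--         r = pos % 60
--         if r == 0:
--             if pos:
--                 out.append("\n")
--             out.append(f"{pos + 1:>10} ")
--         elif r % 10 == 0:
--             out.append(" ")
--         out.append(ch)
--     if seq:
--         out.append("\n")
--     return "".join(out)
-- ===== Notes on version B (the rewrite author's own statement) =====
-- stated objective: alternative
-- what changed: B is a streaming state machine: one pass over the characters with a position counter whose modular value decides what separator/header to emit before each character, instead of A's two-level nested slicing into 60- and 10-character windows.
import Mathlib
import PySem

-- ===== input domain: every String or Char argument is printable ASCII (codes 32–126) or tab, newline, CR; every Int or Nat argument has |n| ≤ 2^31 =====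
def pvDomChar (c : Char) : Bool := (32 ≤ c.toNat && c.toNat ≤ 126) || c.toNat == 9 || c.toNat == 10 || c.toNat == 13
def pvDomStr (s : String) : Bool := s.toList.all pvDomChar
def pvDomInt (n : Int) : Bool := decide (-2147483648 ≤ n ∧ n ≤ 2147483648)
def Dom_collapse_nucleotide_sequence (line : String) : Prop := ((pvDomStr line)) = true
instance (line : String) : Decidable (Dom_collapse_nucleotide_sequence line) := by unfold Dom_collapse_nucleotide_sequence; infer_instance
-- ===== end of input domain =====

-- B replaces A's nested 60-/10-character slicing with a single streaming pass: a position
-- counter decides, per character, which separator or line header to emit before it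
-- (objective: alternative algorithm, same cost).

-- ===== PORT A =====
-- f"{n:>10}": right-justify the decimal string of an int in width 10 with spaces
-- (hand port, exact for ints: the pad count clamps at 0 like Python's format).
def pvRJ10 (n : Int) : String :=
  String.ofList (List.replicate (10 - (PySem.Int.toStr n).toList.length) ' '
    ++ (PySem.Int.toStr n).toList)

def collapse_nucleotide_sequence (line : String) : String :=
  let line := PySem.Str.replace line "\n" ""
  (PySem.List.pyRange 0 (PySem.Str.len line) 60).foldl
    (fun acc i =>
      let sequence_line := PySem.Str.lower (PySem.Str.slice line (some i) (some (i + 60)))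
      let spaced_sequence_line := PySem.Str.join " "
        ((PySem.List.pyRange 0 (PySem.Str.len sequence_line) 10).map
          (fun t => PySem.Str.slice sequence_line (some t) (some (t + 10))))
      acc ++ (pvRJ10 (i + 1) ++ " " ++ spaced_sequence_line ++ "\n")) ""

-- ===== PORT B =====
def collapse_nucleotide_sequence_alt (line : String) : String :=
  let seq := PySem.Str.lower (PySem.Str.replace line "\n" "")
  let out := (PySem.List.enumerate seq.toList 0).foldl
    (fun out pc =>
      let r := PySem.Int.mod pc.1 60
      let out :=
        if r = 0 then
          (if pc.1 ≠ 0 then out ++ ["\n"] else out) ++ [pvRJ10 (pc.1 + 1) ++ " "]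
        else if PySem.Int.mod r 10 = 0 then out ++ [" "]
        else out
      out ++ [String.singleton pc.2]) ([] : List String)
  let out := if PySem.Str.len seq = 0 then out else out ++ ["\n"]
  PySem.Str.join "" out

-- ===== PRECONDITION & SPEC =====
def Spec_collapse_nucleotide_sequence (line : String) (out : String) : Prop := out = collapse_nucleotide_sequence_alt line
instance (line : String) (out : String) : Decidable (Spec_collapse_nucleotide_sequence line out) := by unfold Spec_collapse_nucleotide_sequence; infer_instance

-- ===== CLAIM (what is proved, stated in full; the proofs are below) =====
def Claim_equal_collapse_nucleotide_sequence : Prop := ∀ (line : String), Dom_collapse_nucleotide_sequence line → Spec_collapse_nucleotide_sequence line (collapse_nucleotide_sequence line)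

-- ===== LEMMAS AND PROOFS =====

-- char list of the right-justified header
def pvRJC (i : Int) : List Char := (pvRJ10 i).toList

-- a 60-char row body with a space every 10 characters (10-at-a-time recursion)
def pvSpaced (cs : List Char) : List Char :=
  if cs.length ≤ 10 then cs
  else cs.take 10 ++ ' ' :: pvSpaced (cs.drop 10)
termination_by cs.length
decreasing_by simp; omega

-- canonical 60-at-a-time row recursion (A's shape)
def pvAR (ls : List Char) (k : Nat) : List Char :=
  if h : ls = [] then []
  else pvRJC (60 * (k : Int) + 1) ++ ' ' :: pvSpaced (ls.take 60) ++ '\n' :: pvAR (ls.drop 60) (k + 1)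
termination_by ls.length
decreasing_by cases ls with | nil => exact absurd rfl h | cons a l => simp

-- 10-at-a-time recursion: body after the first header (B's regrouped shape)
def pvRows (ls : List Char) (q : Nat) : List Char :=
  if ls.length ≤ 10 then ls ++ ['\n']
  else ls.take 10 ++
    (if (q + 1) % 6 = 0 then '\n' :: pvRJC (10 * ((q : Int) + 1) + 1) ++ [' '] else [' ']) ++
    pvRows (ls.drop 10) (q + 1)
termination_by ls.length
decreasing_by simp; omega

-- per-character emission of B as a structural recursion over the chars
def pvStream (n : Nat) (ls : List Char) : List Char :=
  match ls with
  | [] => []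
  | c :: cs =>
    (if n % 60 = 0 then (if n ≠ 0 then ['\n'] else []) ++ pvRJC ((n : Int) + 1) ++ [' ']
     else if n % 10 = 0 then [' '] else []) ++ c :: pvStream (n + 1) cs

lemma pv_strFoldl_toList (F : Int → String) (l : List Int) (s : String) :
    (l.foldl (fun acc i => acc ++ F i) s).toList
      = s.toList ++ l.flatMap (fun i => (F i).toList) := by
  induction l generalizing s with
  | nil => simp
  | cons x xs ih => simp [List.foldl, ih, String.toList_append]

lemma pv_join_nil_eq_flatten (ps : List (List Char)) :
    PySem.Chars.join ([] : List Char) ps = ps.flatten := by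
  induction ps with
  | nil => simp [PySem.Chars.join, List.intercalate]
  | cons p rest ih =>
    cases rest with
    | nil => simp [PySem.Chars.join, List.intercalate]
    | cons q r => rw [PySem.Chars.join_cons_cons]; simp_all

lemma pv_map_slice {α β : Type} (f : α → β) (xs : List α) (a? b? : Option Int) :
    (PySem.List.slice xs a? b?).map f = PySem.List.slice (xs.map f) a? b? := by
  simp [PySem.List.slice, List.map_take, List.map_drop]

lemma pv_lower_slice (cs : List Char) (a? b? : Option Int) :
    PySem.Chars.lower (PySem.List.slice cs a? b?)
      = PySem.List.slice (PySem.Chars.lower cs) a? b? := by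
  simp [PySem.Chars.lower, pv_map_slice]

-- A-side: the inner ' '.join over 10-slices is pvSpaced
lemma pv_join10 (m : Nat) (cs : List Char) (hm : cs.length ≤ m) :
    PySem.Chars.join [' ']
      ((PySem.List.pyRange 0 (cs.length : Int) 10).map
        (fun t => PySem.List.slice cs (some t) (some (t + 10))))
      = pvSpaced cs := by
  induction m generalizing cs with
  | zero =>
    have he : cs = [] := List.length_eq_zero_iff.mp (by omega)
    subst he
    simp only [List.length_nil, Nat.cast_zero]
    rw [PySem.List.pyRange_of_pos 0 0 (by norm_num : (0 : Int) < 10)]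
    simp [pvSpaced]
  | succ m ih =>
    by_cases h0 : cs.length = 0
    · have he : cs = [] := List.length_eq_zero_iff.mp h0
      subst he
      simp only [List.length_nil, Nat.cast_zero]
      rw [PySem.List.pyRange_of_pos 0 0 (by norm_num : (0 : Int) < 10)]
      simp [pvSpaced]
    · rw [PySem.List.pyRange_of_pos 0 (cs.length : Int) (by norm_num),
        if_pos (by exact_mod_cast Nat.pos_of_ne_zero h0)]
      by_cases hle : cs.length ≤ 10
      · rw [show ((((cs.length : Int)) - 0 + 10 - 1) / 10).toNat = 1 from by omega,
          List.range_one, List.map_map]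
        simp only [List.map_cons, List.map_nil, Function.comp_def]
        rw [show ((0 : Int) + 10 * ((0 : Nat) : Int)) = ((0 : Nat) : Int) from by norm_num]
        rw [show ((0 : Nat) : Int) + 10 = ((0 : Nat) : Int) + ((10 : Nat) : Int) from by norm_num,
          PySem.List.slice_natCast_add]
        rw [List.drop_zero, List.take_of_length_le hle, PySem.Chars.join_singleton]
        rw [pvSpaced, if_pos hle]
      · have hM : ((((cs.length : Int)) - 0 + 10 - 1) / 10).toNat
            = (((((cs.drop 10).length : Nat) : Int) - 0 + 10 - 1) / 10).toNat + 1 := by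
          rw [List.length_drop]; omega
        rw [hM, List.range_succ_eq_map]
        simp only [List.map_cons, List.map_map, Function.comp_def]
        have hhead : PySem.List.slice cs (some ((0 : Int) + 10 * ((0 : Nat) : Int)))
            (some ((0 : Int) + 10 * ((0 : Nat) : Int) + 10)) = cs.take 10 := by
          rw [show ((0 : Int) + 10 * ((0 : Nat) : Int)) = ((0 : Nat) : Int) from by norm_num,
            show ((0 : Nat) : Int) + 10 = ((0 : Nat) : Int) + ((10 : Nat) : Int) from by norm_num,
            PySem.List.slice_natCast_add, List.drop_zero]
        have htail : (List.range ((((((cs.drop 10).length : Nat) : Int)) - 0 + 10 - 1) / 10).toNat).map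
              (fun x => PySem.List.slice cs (some ((0 : Int) + 10 * ((Nat.succ x : Nat) : Int)))
                (some ((0 : Int) + 10 * ((Nat.succ x : Nat) : Int) + 10)))
            = (PySem.List.pyRange 0 (((cs.drop 10).length : Nat) : Int) 10).map
                (fun t => PySem.List.slice (cs.drop 10) (some t) (some (t + 10))) := by
          rw [PySem.List.pyRange_of_pos 0 (((cs.drop 10).length : Nat) : Int) (by norm_num),
            if_pos (by rw [List.length_drop]; omega : (0 : Int) < (((cs.drop 10).length : Nat) : Int)),
            List.map_map]
          apply List.map_congr_left
          intro x hx
          simp only [Function.comp_def]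
          rw [show ((0 : Int) + 10 * ((Nat.succ x : Nat) : Int)) = ((10 * (x + 1) : Nat) : Int) from by
              push_cast; ring,
            show ((10 * (x + 1) : Nat) : Int) + 10 = ((10 * (x + 1) : Nat) : Int) + ((10 : Nat) : Int) from by
              norm_num,
            PySem.List.slice_natCast_add,
            show ((0 : Int) + 10 * ((x : Nat) : Int)) = ((10 * x : Nat) : Int) from by push_cast; ring,
            show ((10 * x : Nat) : Int) + 10 = ((10 * x : Nat) : Int) + ((10 : Nat) : Int) from by norm_num,
            PySem.List.slice_natCast_add, List.drop_drop]
          congr 2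
          omega
        rw [hhead, htail]
        have hlen : ((PySem.List.pyRange 0 (((cs.drop 10).length : Nat) : Int) 10).map
            (fun t => PySem.List.slice (cs.drop 10) (some t) (some (t + 10)))).length ≠ 0 := by
          rw [List.length_map, PySem.List.pyRange_of_pos 0 _ (by norm_num),
            if_pos (by rw [List.length_drop]; omega : (0 : Int) < (((cs.drop 10).length : Nat) : Int)),
            List.length_map, List.length_range, List.length_drop]
          omega
        cases hT : (PySem.List.pyRange 0 (((cs.drop 10).length : Nat) : Int) 10).map
            (fun t => PySem.List.slice (cs.drop 10) (some t) (some (t + 10))) with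
        | nil => rw [hT] at hlen; simp at hlen
        | cons y ys =>
          rw [PySem.Chars.join_cons_cons, ← hT,
            ih (cs.drop 10) (by rw [List.length_drop]; omega)]
          conv_rhs => rw [pvSpaced]
          rw [if_neg hle]
          simp [List.append_assoc]

-- A-side: the outer loop over 60-slices is pvAR
lemma pv_A_flat (m : Nat) (ls : List Char) (k : Nat) (hm : ls.length ≤ m) :
    ((PySem.List.pyRange 0 (ls.length : Int) 60).flatMap
      (fun i => pvRJC (60 * (k : Int) + i + 1) ++ ' ' ::
        PySem.Chars.join [' ']
          ((PySem.List.pyRange 0 (((PySem.List.slice ls (some i) (some (i + 60))).length : Nat) : Int) 10).map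
            (fun t => PySem.List.slice (PySem.List.slice ls (some i) (some (i + 60))) (some t) (some (t + 10))))
        ++ ['\n']))
      = pvAR ls k := by
  induction m generalizing ls k with
  | zero =>
    have he : ls = [] := List.length_eq_zero_iff.mp (by omega)
    subst he
    simp only [List.length_nil, Nat.cast_zero]
    rw [PySem.List.pyRange_of_pos 0 0 (by norm_num : (0 : Int) < 60)]
    rw [pvAR, dif_pos rfl]
    simp
  | succ m ih =>
    by_cases h0 : ls.length = 0
    · have he : ls = [] := List.length_eq_zero_iff.mp h0
      subst he
      simp only [List.length_nil, Nat.cast_zero]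
      rw [PySem.List.pyRange_of_pos 0 0 (by norm_num : (0 : Int) < 60)]
      rw [pvAR, dif_pos rfl]
      simp
    · have hne : ls ≠ [] := fun he => h0 (by simp [he])
      rw [PySem.List.pyRange_of_pos 0 (ls.length : Int) (by norm_num),
        if_pos (by exact_mod_cast Nat.pos_of_ne_zero h0)]
      have hM : ((((ls.length : Int)) - 0 + 60 - 1) / 60).toNat
          = (((((ls.drop 60).length : Nat) : Int) - 0 + 60 - 1) / 60).toNat + 1 := by
        rw [List.length_drop]; omega
      rw [hM, List.range_succ_eq_map]
      simp only [List.flatMap_def, List.map_cons, List.map_map, Function.comp_def,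
        List.flatten_cons]
      have hhead : PySem.List.slice ls (some ((0 : Int) + 60 * ((0 : Nat) : Int)))
          (some ((0 : Int) + 60 * ((0 : Nat) : Int) + 60)) = ls.take 60 := by
        rw [show ((0 : Int) + 60 * ((0 : Nat) : Int)) = ((0 : Nat) : Int) from by norm_num,
          show ((0 : Nat) : Int) + 60 = ((0 : Nat) : Int) + ((60 : Nat) : Int) from by norm_num,
          PySem.List.slice_natCast_add, List.drop_zero]
      rw [hhead,
        show (60 * (k : Int) + ((0 : Int) + 60 * ((0 : Nat) : Int)) + 1) = 60 * (k : Int) + 1 from by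
          push_cast; ring,
        pv_join10 ((ls.take 60).length) (ls.take 60) le_rfl]
      have htail : (List.range ((((((ls.drop 60).length : Nat) : Int)) - 0 + 60 - 1) / 60).toNat).map
            (fun x => pvRJC (60 * (k : Int) + ((0 : Int) + 60 * ((Nat.succ x : Nat) : Int)) + 1) ++
              ' ' :: PySem.Chars.join [' ']
                (List.map
                  (fun t => PySem.List.slice
                    (PySem.List.slice ls (some ((0 : Int) + 60 * ((Nat.succ x : Nat) : Int)))
                      (some ((0 : Int) + 60 * ((Nat.succ x : Nat) : Int) + 60)))
                    (some t) (some (t + 10)))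
                  (PySem.List.pyRange 0
                    (((PySem.List.slice ls (some ((0 : Int) + 60 * ((Nat.succ x : Nat) : Int)))
                      (some ((0 : Int) + 60 * ((Nat.succ x : Nat) : Int) + 60))).length : Nat) : Int) 10)) ++
              ['\n'])
          = (PySem.List.pyRange 0 (((ls.drop 60).length : Nat) : Int) 60).map
              (fun i => pvRJC (60 * (((k + 1 : Nat)) : Int) + i + 1) ++
                ' ' :: PySem.Chars.join [' ']
                  (List.map
                    (fun t => PySem.List.slice
                      (PySem.List.slice (ls.drop 60) (some i) (some (i + 60)))
                      (some t) (some (t + 10)))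
                    (PySem.List.pyRange 0
                      (((PySem.List.slice (ls.drop 60) (some i) (some (i + 60))).length : Nat) : Int) 10)) ++
                ['\n']) := by
        by_cases hd : (ls.drop 60).length = 0
        · rw [hd]
          simp only [Nat.cast_zero]
          rw [PySem.List.pyRange_of_pos 0 0 (by norm_num : (0 : Int) < 60)]
          norm_num
        · rw [PySem.List.pyRange_of_pos 0 (((ls.drop 60).length : Nat) : Int) (by norm_num),
            if_pos (by omega : (0 : Int) < (((ls.drop 60).length : Nat) : Int)),
            List.map_map]
          apply List.map_congr_left
          intro x hx
          simp only [Function.comp_def]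
          have hsl : PySem.List.slice ls (some ((0 : Int) + 60 * ((Nat.succ x : Nat) : Int)))
              (some ((0 : Int) + 60 * ((Nat.succ x : Nat) : Int) + 60))
              = PySem.List.slice (ls.drop 60) (some ((0 : Int) + 60 * ((x : Nat) : Int)))
                (some ((0 : Int) + 60 * ((x : Nat) : Int) + 60)) := by
            rw [show ((0 : Int) + 60 * ((Nat.succ x : Nat) : Int)) = ((60 * (x + 1) : Nat) : Int) from by
                push_cast; ring,
              show ((60 * (x + 1) : Nat) : Int) + 60 = ((60 * (x + 1) : Nat) : Int) + ((60 : Nat) : Int) from by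
                norm_num,
              PySem.List.slice_natCast_add,
              show ((0 : Int) + 60 * ((x : Nat) : Int)) = ((60 * x : Nat) : Int) from by push_cast; ring,
              show ((60 * x : Nat) : Int) + 60 = ((60 * x : Nat) : Int) + ((60 : Nat) : Int) from by norm_num,
              PySem.List.slice_natCast_add, List.drop_drop]
            congr 2
            omega
          rw [hsl,
            show (60 * (k : Int) + ((0 : Int) + 60 * ((Nat.succ x : Nat) : Int)) + 1)
                = 60 * (((k + 1 : Nat)) : Int) + ((0 : Int) + 60 * ((x : Nat) : Int)) + 1 from by
              push_cast; ring]
      rw [htail, ← List.flatMap_def, ih (ls.drop 60) (k + 1) (by rw [List.length_drop]; omega)]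
      conv_rhs => rw [pvAR]
      rw [dif_neg hne]
      simp [List.append_assoc]

-- B-side: the enumerate fold is pvStream
lemma pv_B_stream (ls : List Char) (n : Nat) :
    (PySem.List.enumerate ls (n : Int)).flatMap
      (fun pc =>
        (if PySem.Int.mod pc.1 60 = 0 then
            (if pc.1 ≠ 0 then ['\n'] else []) ++ pvRJC (pc.1 + 1) ++ [' ']
          else if PySem.Int.mod (PySem.Int.mod pc.1 60) 10 = 0 then [' '] else []) ++ [pc.2])
      = pvStream n ls := by
  induction ls generalizing n with
  | nil => simp [PySem.List.enumerate_nil, pvStream]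
  | cons c cs ih =>
    rw [PySem.List.enumerate_cons, List.flatMap_cons, pvStream]
    have h60 : PySem.Int.mod ((n : Nat) : Int) 60 = ((n % 60 : Nat) : Int) := by
      exact_mod_cast PySem.Int.mod_natCast n 60
    have h10 : PySem.Int.mod (((n % 60 : Nat) : Int)) 10 = ((n % 60 % 10 : Nat) : Int) := by
      exact_mod_cast PySem.Int.mod_natCast (n % 60) 10
    have hmm : n % 60 % 10 = n % 10 := by omega
    have hn1 : ((n : Nat) : Int) + 1 = (((n + 1 : Nat)) : Int) := by push_cast; ring
    rw [h60, h10, hmm]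
    simp only [Nat.cast_eq_zero, ne_eq, Nat.cast_eq_zero]
    rw [hn1, ih (n + 1), List.append_assoc, List.singleton_append]

-- pvStream within a 10-chunk: nothing is emitted between characters
lemma pv_stream_skip (j : Nat) (n : Nat) (cs : List Char)
    (h : ∀ i, i < j → (n + i) % 10 ≠ 0) :
    pvStream n cs = cs.take j ++ pvStream (n + j) (cs.drop j) := by
  induction j generalizing n cs with
  | zero => simp
  | succ j ih =>
    cases cs with
    | nil => simp [pvStream]
    | cons c cs' =>
      have h0 : n % 10 ≠ 0 := by simpa using h 0 (by omega)
      have h60 : ¬ n % 60 = 0 := fun hh => h0 (by omega)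
      rw [pvStream]
      simp only [if_neg h60, if_neg h0, List.nil_append, List.take_succ_cons,
        List.drop_succ_cons, List.cons_append]
      rw [ih (n + 1) cs' (fun i hi => by
        have := h (i + 1) (by omega); omega)]
      have : n + 1 + j = n + (j + 1) := by omega
      rw [this]

-- pvStream at a chunk boundary equals pvRows (plus the closing newline)
lemma pv_stream_rows (m : Nat) (ls : List Char) (q : Nat) (hm : ls.length ≤ m) (h : ls ≠ []) :
    pvStream (10 * q) ls ++ ['\n']
      = (if q % 6 = 0 then (if q ≠ 0 then ['\n'] else []) ++ pvRJC (10 * (q : Int) + 1) ++ [' ']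
         else [' ']) ++ pvRows ls q := by
  induction m generalizing ls q with
  | zero => cases ls with | nil => exact absurd rfl h | cons c cs => simp at hm
  | succ m ih =>
    cases ls with
    | nil => exact absurd rfl h
    | cons c cs =>
      have hemit : (if (10 * q) % 60 = 0 then
            (if 10 * q ≠ 0 then ['\n'] else []) ++ pvRJC (((10 * q : Nat) : Int) + 1) ++ [' ']
          else if (10 * q) % 10 = 0 then [' '] else [])
          = (if q % 6 = 0 then (if q ≠ 0 then ['\n'] else []) ++ pvRJC (10 * (q : Int) + 1) ++ [' ']
             else [' ']) := by
        have hcast : (((10 * q : Nat)) : Int) + 1 = 10 * (q : Int) + 1 := by push_cast; ring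
        by_cases hq : q % 6 = 0
        · rw [if_pos (by omega : (10 * q) % 60 = 0), if_pos hq, hcast]
          by_cases hz : q = 0
          · subst hz; norm_num
          · rw [if_pos (by omega : 10 * q ≠ 0), if_pos hz]
        · rw [if_neg (by omega : ¬ (10 * q) % 60 = 0),
            if_pos (by omega : (10 * q) % 10 = 0), if_neg hq]
      rw [pvStream, pv_stream_skip 9 (10 * q + 1) cs (fun i hi => by omega), hemit,
        show 10 * q + 1 + 9 = 10 * (q + 1) from by omega]
      by_cases hle : cs.length ≤ 9
      · rw [List.drop_eq_nil_iff.mpr (by omega), List.take_of_length_le hle, pvRows,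
          if_pos (show (c :: cs).length ≤ 10 by simp only [List.length_cons]; omega)]
        simp [pvStream, List.append_assoc]
      · have hih := ih (cs.drop 9) (q + 1) (by simp at hm ⊢; omega)
          (by simp [List.drop_eq_nil_iff]; omega)
        rw [pvRows, if_neg (show ¬ (c :: cs).length ≤ 10 by simp only [List.length_cons]; omega)]
        simp only [List.cons_append, List.append_assoc, List.take_succ_cons, List.drop_succ_cons]
        rw [hih]
        have : ¬ q + 1 = 0 := by omega
        simp only [ne_eq, this, not_false_eq_true, if_true, ite_not]
        push_cast
        simp

-- pvRows unrolled one 60-row at a time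
lemma pv_rows_spec (m : Nat) (ls : List Char) (q : Nat) (hm : ls.length ≤ m) :
    pvRows ls q
      = pvSpaced (ls.take (10 * (6 - q % 6))) ++
        (if ls.length ≤ 10 * (6 - q % 6) then ['\n']
         else '\n' :: pvRJC (10 * ((q : Int) + (6 - q % 6 : Nat)) + 1) ++ ' ' ::
           pvRows (ls.drop (10 * (6 - q % 6))) (q + (6 - q % 6))) := by
  have hr5 : 1 ≤ 6 - q % 6 ∧ 6 - q % 6 ≤ 6 := by omega
  induction m generalizing ls q with
  | zero =>
    have he : ls = [] := List.length_eq_zero_iff.mp (by omega)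
    subst he
    rw [pvRows, if_pos (by simp), pvSpaced]
    simp
  | succ m ih =>
    rw [pvRows]
    by_cases hle : ls.length ≤ 10
    · rw [if_pos hle, if_pos (by omega : ls.length ≤ 10 * (6 - q % 6))]
      rw [List.take_of_length_le (by omega : ls.length ≤ 10 * (6 - q % 6)), pvSpaced, if_pos hle]
    · rw [if_neg hle]
      by_cases h5 : q % 6 = 5
      · have e1 : 6 - q % 6 = 1 := by omega
        rw [e1, if_pos (by omega : (q + 1) % 6 = 0),
          if_neg (by omega : ¬ ls.length ≤ 10 * 1),
          show (10 : Nat) * 1 = 10 from by omega,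
          pvSpaced, if_pos (by simp : (ls.take 10).length ≤ 10)]
        push_cast
        simp [List.append_assoc]
      · have hq1 : (q + 1) % 6 = q % 6 + 1 := by omega
        rw [if_neg (by omega : ¬ (q + 1) % 6 = 0)]
        have hihpre : (ls.drop 10).length ≤ m := by simp; omega
        have hihr : 1 ≤ 6 - (q + 1) % 6 ∧ 6 - (q + 1) % 6 ≤ 6 := by omega
        have et' : 6 - (q + 1) % 6 = (6 - q % 6) - 1 := by omega
        -- unfold pvSpaced on the RHS first (the ih rewrite below introduces another pvSpaced)
        conv_rhs => rw [pvSpaced]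
        rw [if_neg (by simp; omega : ¬ (ls.take (10 * (6 - q % 6))).length ≤ 10)]
        rw [List.take_take, show min 10 (10 * (6 - q % 6)) = 10 from by omega,
          List.drop_take, show 10 * (6 - q % 6) - 10 = 10 * (6 - (q + 1) % 6) from by omega]
        rw [ih (ls.drop 10) (q + 1) hihpre hihr]
        have hcond : ((ls.drop 10).length ≤ 10 * (6 - (q + 1) % 6)) ↔ (ls.length ≤ 10 * (6 - q % 6)) := by
          rw [List.length_drop, hq1]; omega
        have hhead : 10 * (((q + 1 : Nat) : Int) + ((6 - (q + 1) % 6 : Nat) : Int)) + 1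
            = 10 * ((q : Int) + ((6 - q % 6 : Nat) : Int)) + 1 := by
          have h1 : ((6 - (q + 1) % 6 : Nat) : Int) = ((6 - q % 6 : Nat) : Int) - 1 := by
            omega
          rw [h1]; push_cast; ring
        have hdrop : (ls.drop 10).drop (10 * (6 - (q + 1) % 6)) = ls.drop (10 * (6 - q % 6)) := by
          rw [List.drop_drop]; congr 1; omega
        have hidx : q + 1 + (6 - (q + 1) % 6) = q + (6 - q % 6) := by omega
        rw [hhead, hdrop, hidx]
        by_cases hlt : ls.length ≤ 10 * (6 - q % 6)
        · rw [if_pos hlt, if_pos (hcond.mpr hlt)]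
          simp [List.append_assoc]
        · rw [if_neg hlt, if_neg (fun hh => hlt (hcond.mp hh))]
          simp [List.append_assoc]

-- pvAR is the header followed by pvRows
lemma pv_AR_rows (m : Nat) (ls : List Char) (k : Nat) (hm : ls.length ≤ m) (h : ls ≠ []) :
    pvAR ls k = pvRJC (60 * (k : Int) + 1) ++ ' ' :: pvRows ls (6 * k) := by
  induction m generalizing ls k with
  | zero => cases ls with | nil => exact absurd rfl h | cons a l => simp at hm
  | succ m ih =>
    rw [pvAR, dif_neg h, pv_rows_spec (m + 1) ls (6 * k) hm]
    rw [show (6 * k) % 6 = 0 from by omega]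
    norm_num
    by_cases hle : ls.length ≤ 60
    · rw [if_pos hle, List.drop_eq_nil_iff.mpr hle, pvAR, dif_pos rfl]
    · rw [if_neg hle,
        ih (ls.drop 60) (k + 1) (by simp; omega) (by simp [List.drop_eq_nil_iff]; omega),
        show 6 * k + 6 = 6 * (k + 1) from by omega,
        show (10 : Int) * (6 * (k : Int) + 6) + 1 = 60 * (((k + 1 : Nat)) : Int) + 1 from by
          push_cast; ring]

lemma pv_flatten_toList_flatMap {α : Type} (g : α → List String) (l : List α) :
    (List.map String.toList (l.flatMap g)).flatten
      = l.flatMap (fun x => ((g x).map String.toList).flatten) := by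
  induction l with
  | nil => simp
  | cons a t ih => simp [List.flatMap_cons, List.map_append, List.flatten_append, ih]

theorem pv_main (line : String) :
    collapse_nucleotide_sequence line = collapse_nucleotide_sequence_alt line := by
  rw [← String.toList_inj]
  unfold collapse_nucleotide_sequence collapse_nucleotide_sequence_alt
  rw [pv_strFoldl_toList]
  simp only [PySem.Str.toList_join, PySem.Str.toList_lower, PySem.Str.toList_slice,
    PySem.Str.toList_replace, PySem.Str.len_eq, String.toList_append,
    PySem.Chars.slice_eq_listSlice, List.map_map]
  simp only [Function.comp_def, PySem.Str.toList_lower, PySem.Str.toList_slice,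
    PySem.Str.toList_replace, PySem.Chars.slice_eq_listSlice]
  simp only [pv_lower_slice]
  have h0 : "".toList = ([] : List Char) := rfl
  have hsp : " ".toList = ([' '] : List Char) := rfl
  have hnl : "\n".toList = (['\n'] : List Char) := rfl
  rw [h0, hsp, hnl, List.nil_append]
  rw [show (PySem.Chars.replace line.toList ['\n'] []).length
      = (PySem.Chars.lower (PySem.Chars.replace line.toList ['\n'] [])).length from by
    simp [PySem.Chars.lower]]
  generalize (PySem.Chars.lower (PySem.Chars.replace line.toList ['\n'] [])) = ls
  by_cases hne : ls = []
  · subst hne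
    simp only [List.length_nil, Nat.cast_zero]
    rw [PySem.List.pyRange_of_pos 0 0 (by norm_num : (0 : Int) < 60)]
    simp [PySem.List.enumerate_nil]
  · rw [if_neg (fun hh : ((ls.length : Nat) : Int) = 0 =>
      hne (List.length_eq_zero_iff.mp (by exact_mod_cast hh)))]
    rw [show (fun (out : List String) (pc : Int × Char) =>
          (if PySem.Int.mod pc.1 60 = 0 then
              (if pc.1 ≠ 0 then out ++ ["\n"] else out) ++ [pvRJ10 (pc.1 + 1) ++ " "]
            else if PySem.Int.mod (PySem.Int.mod pc.1 60) 10 = 0 then out ++ [" "] else out) ++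
            [String.singleton pc.2])
        = (fun (out : List String) (pc : Int × Char) => out ++
            ((if PySem.Int.mod pc.1 60 = 0 then
                (if pc.1 ≠ 0 then ["\n"] else []) ++ [pvRJ10 (pc.1 + 1) ++ " "]
              else if PySem.Int.mod (PySem.Int.mod pc.1 60) 10 = 0 then [" "] else []) ++
              [String.singleton pc.2]))
        from by funext out pc; split_ifs <;> simp]
    rw [PySem.List.foldl_append_eq_flatMap, List.nil_append]
    rw [pv_join_nil_eq_flatten, List.map_append, List.flatten_append,
      pv_flatten_toList_flatMap]
    rw [show (fun (pc : Int × Char) =>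
          (((if PySem.Int.mod pc.1 60 = 0 then
                (if pc.1 ≠ 0 then ["\n"] else []) ++ [pvRJ10 (pc.1 + 1) ++ " "]
              else if PySem.Int.mod (PySem.Int.mod pc.1 60) 10 = 0 then [" "] else []) ++
              [String.singleton pc.2]).map String.toList).flatten)
        = (fun (pc : Int × Char) =>
            (if PySem.Int.mod pc.1 60 = 0 then
                (if pc.1 ≠ 0 then ['\n'] else []) ++ pvRJC (pc.1 + 1) ++ [' ']
              else if PySem.Int.mod (PySem.Int.mod pc.1 60) 10 = 0 then [' '] else []) ++ [pc.2])
        from by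
      funext pc
      split_ifs <;> simp [pvRJC, String.toList_append]]
    have hB := pv_B_stream ls 0
    simp only [Nat.cast_zero] at hB
    rw [hB]
    have hA := pv_A_flat ls.length ls 0 le_rfl
    simp only [Nat.cast_zero, mul_zero, zero_add] at hA
    rw [show (fun i =>
          (pvRJ10 (i + 1)).toList ++ [' '] ++
              PySem.Chars.join [' ']
                (List.map
                  (fun x => PySem.List.slice (PySem.List.slice ls (some i) (some (i + 60))) (some x) (some (x + 10)))
                  (PySem.List.pyRange 0 (((PySem.List.slice ls (some i) (some (i + 60))).length : Nat) : Int) 10)) ++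
            ['\n'])
        = (fun i =>
            pvRJC (i + 1) ++
                ' ' ::
                  PySem.Chars.join [' ']
                    (List.map
                      (fun t => PySem.List.slice (PySem.List.slice ls (some i) (some (i + 60))) (some t) (some (t + 10)))
                      (PySem.List.pyRange 0 (((PySem.List.slice ls (some i) (some (i + 60))).length : Nat) : Int) 10)) ++
              ['\n'])
        from funext fun i => by simp [pvRJC, List.append_assoc]]
    rw [hA, pv_AR_rows ls.length ls 0 le_rfl hne]
    have hs := pv_stream_rows ls.length ls 0 le_rfl hne
    norm_num at hs ⊢
    rw [hnl, hs]

-- ===== VERDICT (by name: the statement is the Claim_ definition above) =====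
theorem collapse_nucleotide_sequence_spec : Claim_equal_collapse_nucleotide_sequence := by
  intro line _
  unfold Spec_collapse_nucleotide_sequence
  exact pv_main line
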